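-- pv_equiv track=rewrite | github.com/pypi-data/pypi-mirror-199 | packages/gnssanalysis/gnssanalysis-0.0.25.tar.gz/gnssanalysis-0.0.25/gnssanalysis/gn_io/erp.py | get_canonical_header
-- ===== SOURCE A (Python) =====
-- def get_canonical_header(header: str) -> str:
--     """Map ERP column header to a canonical representation of that column header
--
--     :param str header: ERP column header
--     :return str: Canonical column header
--     """
--     if header.endswith("SIG"):
--         base_header_label = get_canonical_header(header[:-3])
--         if base_header_label.endswith("pole"):
--             return base_header_label[:-4] + "sig"
--         return base_header_label + "sig"
--     elif header.endswith("CORR"):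
--         base_header_label = get_canonical_header(header[:-4])
--         if base_header_label.endswith("pole"):
--             return base_header_label[:-4] + "corr"
--         return base_header_label + "corr"
--     else:
--         if header in ["X", "XP", "XPOLE"]:
--             return "Xpole"
--         elif header in ["XRT", "XDOT"]:
--             return "Xrt"
--         elif header in ["Y", "YP", "YPOLE"]:
--             return "Ypole"
--         elif header in ["YRT", "YDOT"]:
--             return "Yrt"
--         elif header in ["UT1UTC"]:
--             return "UT1-UTC"
--         elif header in ["UT1RUTC"]:
--             return "UT1R-UTC"
--         elif header in ["UT1TAI"]:
--             return "UT1-TAI"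
--         elif header in ["UT1RTAI"]:
--             return "UT1R-TAI"
--         elif header in ["UT1", "UT"]:
--             return "UT"
--         elif header in ["UT1R", "UTR"]:
--             return "UTR"
--         elif header in ["LOD", "LD"]:
--             return "LOD"
--         elif header in ["LODR", "LDR"]:
--             return "LODR"
--         elif header in ["NF"]:
--             return "Nf"
--         elif header in ["NR"]:
--             return "Nr"
--         elif header in ["NT"]:
--             return "Nt"
--         elif header in ["DEPS", "DE"]:
--             return "Deps"
--         elif header in ["DPSI", "DP"]:
--             return "Dpsi"
--         elif header in ["XUT", "XT"]:
--             return "XUT"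
--         elif header in ["YUT", "YT"]:
--             return "YUT"
--         else:
--             return header
-- ===== SOURCE B (Python) =====
-- _BASE = {
--     "X": "Xpole", "XP": "Xpole", "XPOLE": "Xpole",
--     "XRT": "Xrt", "XDOT": "Xrt",
--     "Y": "Ypole", "YP": "Ypole", "YPOLE": "Ypole",
--     "YRT": "Yrt", "YDOT": "Yrt",
--     "UT1UTC": "UT1-UTC", "UT1RUTC": "UT1R-UTC",
--     "UT1TAI": "UT1-TAI", "UT1RTAI": "UT1R-TAI",
--     "UT1": "UT", "UT": "UT",
--     "UT1R": "UTR", "UTR": "UTR",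
--     "LOD": "LOD", "LD": "LOD",
--     "LODR": "LODR", "LDR": "LODR",
--     "NF": "Nf", "NR": "Nr", "NT": "Nt",
--     "DEPS": "Deps", "DE": "Deps",
--     "DPSI": "Dpsi", "DP": "Dpsi",
--     "XUT": "XUT", "XT": "XUT",
--     "YUT": "YUT", "YT": "YUT",
-- }
--
--
-- def get_canonical_header(header: str) -> str:
--     """Map ERP column header to a canonical representation of that column header
--     (iterative: peel SIG/CORR suffixes onto a stack, map the base, re-append)."""
--     stack = []
--     while True:
--         if header.endswith("SIG"):
--             stack.append("sig")
--             header = header[:-3]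
--         elif header.endswith("CORR"):
--             stack.append("corr")
--             header = header[:-4]
--         else:
--             break
--     out = _BASE.get(header, header)
--     while stack:
--         suffix = stack.pop()
--         if out.endswith("pole"):
--             out = out[:-4] + suffix
--         else:
--             out = out + suffix
--     return out
-- ===== Notes on version B (the rewrite author's own statement) =====
-- stated objective: simpler
-- what changed: Replaces A's self-recursion and 19-branch if/elif chain by an iterative peel of trailing SIG/CORR suffixes onto a stack, a single dictionary lookup for the base header, and a pop loop that re-appends the canonical suffixes.
import Mathlib
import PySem

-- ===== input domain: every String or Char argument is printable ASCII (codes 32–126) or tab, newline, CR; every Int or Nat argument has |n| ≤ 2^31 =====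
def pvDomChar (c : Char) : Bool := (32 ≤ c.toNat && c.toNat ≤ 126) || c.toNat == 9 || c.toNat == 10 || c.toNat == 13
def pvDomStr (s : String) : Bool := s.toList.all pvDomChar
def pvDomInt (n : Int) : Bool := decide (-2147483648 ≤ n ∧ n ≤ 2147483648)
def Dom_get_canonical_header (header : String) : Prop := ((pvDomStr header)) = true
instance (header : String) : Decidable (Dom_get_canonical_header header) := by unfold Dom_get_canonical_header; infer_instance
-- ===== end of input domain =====

-- B replaces A's recursion by an iterative peel of SIG/CORR suffixes onto a stack plus one
-- dictionary lookup for the base header (objective: simpler/idiomatic, not faster).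

-- ===== PORT A =====
-- the terminal if/elif chain of A (the else-branch of the recursion)
def aChain (h : List Char) : List Char :=
  if h ∈ ["X".toList, "XP".toList, "XPOLE".toList] then "Xpole".toList
  else if h ∈ ["XRT".toList, "XDOT".toList] then "Xrt".toList
  else if h ∈ ["Y".toList, "YP".toList, "YPOLE".toList] then "Ypole".toList
  else if h ∈ ["YRT".toList, "YDOT".toList] then "Yrt".toList
  else if h ∈ ["UT1UTC".toList] then "UT1-UTC".toList
  else if h ∈ ["UT1RUTC".toList] then "UT1R-UTC".toList
  else if h ∈ ["UT1TAI".toList] then "UT1-TAI".toList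
  else if h ∈ ["UT1RTAI".toList] then "UT1R-TAI".toList
  else if h ∈ ["UT1".toList, "UT".toList] then "UT".toList
  else if h ∈ ["UT1R".toList, "UTR".toList] then "UTR".toList
  else if h ∈ ["LOD".toList, "LD".toList] then "LOD".toList
  else if h ∈ ["LODR".toList, "LDR".toList] then "LODR".toList
  else if h ∈ ["NF".toList] then "Nf".toList
  else if h ∈ ["NR".toList] then "Nr".toList
  else if h ∈ ["NT".toList] then "Nt".toList
  else if h ∈ ["DEPS".toList, "DE".toList] then "Deps".toList
  else if h ∈ ["DPSI".toList, "DP".toList] then "Dpsi".toList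
  else if h ∈ ["XUT".toList, "XT".toList] then "XUT".toList
  else if h ∈ ["YUT".toList, "YT".toList] then "YUT".toList
  else h

def aRec (h : List Char) : List Char :=
  if PySem.Chars.endswith h "SIG".toList then
    let base := aRec (PySem.Chars.slice h none (some (-3)))
    if PySem.Chars.endswith base "pole".toList then
      PySem.Chars.slice base none (some (-4)) ++ "sig".toList
    else base ++ "sig".toList
  else if PySem.Chars.endswith h "CORR".toList then
    let base := aRec (PySem.Chars.slice h none (some (-4)))
    if PySem.Chars.endswith base "pole".toList then
      PySem.Chars.slice base none (some (-4)) ++ "corr".toList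
    else base ++ "corr".toList
  else aChain h
termination_by h.length
decreasing_by
  · simp only [PySem.Chars.slice_eq_listSlice]
    rw [PySem.List.slice_to_neg_ofNat h 3 (by omega)]
    have h3 : 3 ≤ h.length := by
      have := (PySem.Chars.endswith_iff h "SIG".toList).mp (by assumption)
      simpa using this.length_le
    simp [List.length_take]; omega
  · simp only [PySem.Chars.slice_eq_listSlice]
    rw [PySem.List.slice_to_neg_ofNat h 4 (by omega)]
    have h4 : 4 ≤ h.length := by
      have := (PySem.Chars.endswith_iff h "CORR".toList).mp (by assumption)
      simpa using this.length_le
    simp [List.length_take]; omega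

def get_canonical_header (header : String) : String :=
  String.ofList (aRec header.toList)

-- ===== PORT B =====
-- the module-level dict _BASE of Source B
def bBaseDict : PySem.Dict (List Char) (List Char) :=
  PySem.Dict.ofList [
    ("X".toList, "Xpole".toList), ("XP".toList, "Xpole".toList), ("XPOLE".toList, "Xpole".toList),
    ("XRT".toList, "Xrt".toList), ("XDOT".toList, "Xrt".toList),
    ("Y".toList, "Ypole".toList), ("YP".toList, "Ypole".toList), ("YPOLE".toList, "Ypole".toList),
    ("YRT".toList, "Yrt".toList), ("YDOT".toList, "Yrt".toList),
    ("UT1UTC".toList, "UT1-UTC".toList), ("UT1RUTC".toList, "UT1R-UTC".toList),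
    ("UT1TAI".toList, "UT1-TAI".toList), ("UT1RTAI".toList, "UT1R-TAI".toList),
    ("UT1".toList, "UT".toList), ("UT".toList, "UT".toList),
    ("UT1R".toList, "UTR".toList), ("UTR".toList, "UTR".toList),
    ("LOD".toList, "LOD".toList), ("LD".toList, "LOD".toList),
    ("LODR".toList, "LODR".toList), ("LDR".toList, "LODR".toList),
    ("NF".toList, "Nf".toList), ("NR".toList, "Nr".toList), ("NT".toList, "Nt".toList),
    ("DEPS".toList, "Deps".toList), ("DE".toList, "Deps".toList),
    ("DPSI".toList, "Dpsi".toList), ("DP".toList, "Dpsi".toList),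
    ("XUT".toList, "XUT".toList), ("XT".toList, "XUT".toList),
    ("YUT".toList, "YUT".toList), ("YT".toList, "YUT".toList)]

-- the first while loop of Source B: peel trailing SIG/CORR, pushing onto a stack
def bPeel (h : List Char) : List Char × List (List Char) :=
  if PySem.Chars.endswith h "SIG".toList then
    let r := bPeel (PySem.Chars.slice h none (some (-3)))
    (r.1, "sig".toList :: r.2)
  else if PySem.Chars.endswith h "CORR".toList then
    let r := bPeel (PySem.Chars.slice h none (some (-4)))
    (r.1, "corr".toList :: r.2)
  else (h, [])
termination_by h.length
decreasing_by
  · simp only [PySem.Chars.slice_eq_listSlice]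
    rw [PySem.List.slice_to_neg_ofNat h 3 (by omega)]
    have h3 : 3 ≤ h.length := by
      have := (PySem.Chars.endswith_iff h "SIG".toList).mp (by assumption)
      simpa using this.length_le
    simp [List.length_take]; omega
  · simp only [PySem.Chars.slice_eq_listSlice]
    rw [PySem.List.slice_to_neg_ofNat h 4 (by omega)]
    have h4 : 4 ≤ h.length := by
      have := (PySem.Chars.endswith_iff h "CORR".toList).mp (by assumption)
      simpa using this.length_le
    simp [List.length_take]; omega

-- the second while loop of Source B: pop the stack (last pushed first) and append each suffix
def bApply (out : List Char) (stack : List (List Char)) : List Char :=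
  stack.foldr (fun suffix acc =>
    if PySem.Chars.endswith acc "pole".toList then
      PySem.Chars.slice acc none (some (-4)) ++ suffix
    else acc ++ suffix) out

def get_canonical_header_alt (header : String) : String :=
  let r := bPeel header.toList
  String.ofList (bApply (bBaseDict.getD r.1 r.1) r.2)

-- ===== PRECONDITION & SPEC =====
def Spec_get_canonical_header (header : String) (out : String) : Prop := out = get_canonical_header_alt header
instance (header : String) (out : String) : Decidable (Spec_get_canonical_header header out) := by unfold Spec_get_canonical_header; infer_instance

-- ===== CLAIM (what is proved, stated in full; the proofs are below) =====
def Claim_equal_get_canonical_header : Prop := ∀ (header : String), Dom_get_canonical_header header → Spec_get_canonical_header header (get_canonical_header header)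

-- ===== LEMMAS AND PROOFS =====

-- A's terminal if/elif chain returns exactly what B's dict lookup returns
set_option maxRecDepth 8192 in
theorem chain_eq_dict (h : List Char) : aChain h = bBaseDict.getD h h := by
  by_cases h1 : h = "X".toList
  · subst h1; decide
  by_cases h2 : h = "XP".toList
  · subst h2; decide
  by_cases h3 : h = "XPOLE".toList
  · subst h3; decide
  by_cases h4 : h = "XRT".toList
  · subst h4; decide
  by_cases h5 : h = "XDOT".toList
  · subst h5; decide
  by_cases h6 : h = "Y".toList
  · subst h6; decide
  by_cases h7 : h = "YP".toList
  · subst h7; decide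
  by_cases h8 : h = "YPOLE".toList
  · subst h8; decide
  by_cases h9 : h = "YRT".toList
  · subst h9; decide
  by_cases h10 : h = "YDOT".toList
  · subst h10; decide
  by_cases h11 : h = "UT1UTC".toList
  · subst h11; decide
  by_cases h12 : h = "UT1RUTC".toList
  · subst h12; decide
  by_cases h13 : h = "UT1TAI".toList
  · subst h13; decide
  by_cases h14 : h = "UT1RTAI".toList
  · subst h14; decide
  by_cases h15 : h = "UT1".toList
  · subst h15; decide
  by_cases h16 : h = "UT".toList
  · subst h16; decide
  by_cases h17 : h = "UT1R".toList
  · subst h17; decide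
  by_cases h18 : h = "UTR".toList
  · subst h18; decide
  by_cases h19 : h = "LOD".toList
  · subst h19; decide
  by_cases h20 : h = "LD".toList
  · subst h20; decide
  by_cases h21 : h = "LODR".toList
  · subst h21; decide
  by_cases h22 : h = "LDR".toList
  · subst h22; decide
  by_cases h23 : h = "NF".toList
  · subst h23; decide
  by_cases h24 : h = "NR".toList
  · subst h24; decide
  by_cases h25 : h = "NT".toList
  · subst h25; decide
  by_cases h26 : h = "DEPS".toList
  · subst h26; decide
  by_cases h27 : h = "DE".toList
  · subst h27; decide
  by_cases h28 : h = "DPSI".toList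
  · subst h28; decide
  by_cases h29 : h = "DP".toList
  · subst h29; decide
  by_cases h30 : h = "XUT".toList
  · subst h30; decide
  by_cases h31 : h = "XT".toList
  · subst h31; decide
  by_cases h32 : h = "YUT".toList
  · subst h32; decide
  by_cases h33 : h = "YT".toList
  · subst h33; decide
  simp_all [aChain, bBaseDict, PySem.Dict.ofList, PySem.Dict.update, PySem.Dict.getD_insert,
    PySem.Dict.getD_empty]

theorem main_eq (h : List Char) :
    aRec h = bApply (bBaseDict.getD (bPeel h).1 (bPeel h).1) (bPeel h).2 := by
  rw [aRec, bPeel]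
  by_cases hs : PySem.Chars.endswith h "SIG".toList
  · simp only [hs, if_true]
    rw [main_eq (PySem.Chars.slice h none (some (-3)))]
    simp [bApply]
  · by_cases hc : PySem.Chars.endswith h "CORR".toList
    · simp only [hs, hc, if_true]
      rw [main_eq (PySem.Chars.slice h none (some (-4)))]
      simp [bApply]
    · simp only [hs, hc]
      simpa [bApply] using chain_eq_dict h
termination_by h.length
decreasing_by
  · simp only [PySem.Chars.slice_eq_listSlice]
    rw [PySem.List.slice_to_neg_ofNat h 3 (by omega)]
    have h3 : 3 ≤ h.length := by
      have := (PySem.Chars.endswith_iff h "SIG".toList).mp hs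
      simpa using this.length_le
    simp [List.length_take]; omega
  · simp only [PySem.Chars.slice_eq_listSlice]
    rw [PySem.List.slice_to_neg_ofNat h 4 (by omega)]
    have h4 : 4 ≤ h.length := by
      have := (PySem.Chars.endswith_iff h "CORR".toList).mp hc
      simpa using this.length_le
    simp [List.length_take]; omega

-- ===== VERDICT (by name: the statement is the Claim_ definition above) =====
theorem get_canonical_header_spec : Claim_equal_get_canonical_header := by
  intro header _
  unfold Spec_get_canonical_header get_canonical_header get_canonical_header_alt
  rw [main_eq]
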